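-- pv_equiv track=rewrite | github.com/dlete/torque | torque/audits/libs/audits_ne.py | get_me_overall_audit_result
-- ===== SOURCE A (Python) =====
-- def get_me_overall_audit_result(report_list):
--     ''' Return either "PASS" or "FAIL".
--
--     Look for the keywords "PASS", "FAIL" and "WARNING" in a given list. If you
--     find find the keywords "FAIL" or "WARNING", return "FAIL"; otherwise,
--     return "PASS".
--
--     Args:
--         report_list (list)
--     Returns:
--         overall_audit_result (str)
--     '''
--
--     number_of_fail = 0
--     number_of_pass = 0
--     number_of_warning = 0
--     number_of_empty = 0
--     number_of_inconclusive = 0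
--
--     for item in report_list:
--         # IMPORTANT => LOGICAL OR IS NOT EVALUATED FOR THE IF CONDITION!!!!!!
--         #if ("FAIL" or "WARNING") in item:
--         if "FAIL" in item:
--             number_of_fail = number_of_fail + 1
--         elif "PASS" in item:
--             number_of_pass = number_of_pass + 1
--         elif "WARNING" in item:
--             number_of_warning = number_of_warning + 1
--         elif item is None:
--             number_of_empty = number_of_empty + 1
--         else:
--             number_of_inconclusive = number_of_inconclusive + 1
--
--     if number_of_fail > 0:
--         overall_audit_result = "FAIL"
--     elif number_of_pass > 0:
--         overall_audit_result = "PASS"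
--     else:
--         overall_audit_result = "WARNING"
--
--     return overall_audit_result
-- ===== SOURCE B (Python) =====
-- def get_me_overall_audit_result(report_list):
--     # Staged keyword scans: search the whole list for "FAIL" first; only if
--     # absent, search it for "PASS"; otherwise "WARNING". No per-item
--     # classification and no counters.
--     if any("FAIL" in item for item in report_list):
--         return "FAIL"
--     if any("PASS" in item for item in report_list):
--         return "PASS"
--     return "WARNING"
-- ===== Notes on version B (the rewrite author's own statement) =====
-- stated objective: simpler
-- what changed: Replaces A's per-item classification into five running counters with two staged short-circuiting keyword scans of the list (first for FAIL, then for PASS); valid because once no item contains FAIL, A's pass counter is positive exactly when some item contains PASS.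
import Mathlib
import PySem

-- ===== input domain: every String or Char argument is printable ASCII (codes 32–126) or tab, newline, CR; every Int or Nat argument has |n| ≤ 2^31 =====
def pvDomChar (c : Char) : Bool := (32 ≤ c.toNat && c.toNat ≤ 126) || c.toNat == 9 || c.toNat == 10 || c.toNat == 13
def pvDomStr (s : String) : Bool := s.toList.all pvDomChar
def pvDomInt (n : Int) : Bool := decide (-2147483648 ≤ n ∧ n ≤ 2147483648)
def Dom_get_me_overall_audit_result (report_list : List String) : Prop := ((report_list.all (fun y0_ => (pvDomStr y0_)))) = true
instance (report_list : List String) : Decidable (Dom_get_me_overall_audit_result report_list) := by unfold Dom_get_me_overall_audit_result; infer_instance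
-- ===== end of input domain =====

-- B replaces A's five running counters with two staged short-circuiting keyword scans (FAIL first, then PASS): simpler decomposition, same cost.


-- ===== PORT A =====
-- loop over report_list maintaining the five counters (fail, pass, warning, empty, inconclusive)
def get_me_overall_audit_result (report_list : List String) : String :=
  let counts := report_list.foldl
    (fun (c : Nat × Nat × Nat × Nat × Nat) item =>
      let (nf, np, nw, ne, ni) := c
      if PySem.Str.isIn "FAIL" item then (nf + 1, np, nw, ne, ni)
      else if PySem.Str.isIn "PASS" item then (nf, np + 1, nw, ne, ni)
      else if PySem.Str.isIn "WARNING" item then (nf, np, nw + 1, ne, ni)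
      -- 'item is None' is always False for a list of strings; that branch is unreachable here
      else (nf, np, nw, ne, ni + 1))
    (0, 0, 0, 0, 0)
  if counts.1 > 0 then "FAIL"
  else if counts.2.1 > 0 then "PASS"
  else "WARNING"

-- ===== PORT B =====
-- staged keyword scans: whole-list search for "FAIL", then (only if absent) for "PASS"
def get_me_overall_audit_result_alt (report_list : List String) : String :=
  if report_list.any (fun item => PySem.Str.isIn "FAIL" item) then "FAIL"
  else if report_list.any (fun item => PySem.Str.isIn "PASS" item) then "PASS"
  else "WARNING"

-- ===== PRECONDITION & SPEC =====
def Spec_get_me_overall_audit_result (report_list : List String) (out : String) : Prop := out = get_me_overall_audit_result_alt report_list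
instance (report_list : List String) (out : String) : Decidable (Spec_get_me_overall_audit_result report_list out) := by unfold Spec_get_me_overall_audit_result; infer_instance

-- ===== CLAIM (what is proved, stated in full; the proofs are below) =====
def Claim_equal_get_me_overall_audit_result : Prop := ∀ (report_list : List String), Dom_get_me_overall_audit_result report_list → Spec_get_me_overall_audit_result report_list (get_me_overall_audit_result report_list)

-- ===== LEMMAS AND PROOFS =====

-- the fail and pass counters of A's fold, characterised as countP over the list
theorem pvFoldCounts (l : List String) (nf np nw ne ni : Nat) :
    (l.foldl
      (fun (c : Nat × Nat × Nat × Nat × Nat) item =>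
        let (nf, np, nw, ne, ni) := c
        if PySem.Str.isIn "FAIL" item then (nf + 1, np, nw, ne, ni)
        else if PySem.Str.isIn "PASS" item then (nf, np + 1, nw, ne, ni)
        else if PySem.Str.isIn "WARNING" item then (nf, np, nw + 1, ne, ni)
        else (nf, np, nw, ne, ni + 1))
      (nf, np, nw, ne, ni)).1
      = nf + l.countP (fun item => PySem.Str.isIn "FAIL" item)
    ∧
    (l.foldl
      (fun (c : Nat × Nat × Nat × Nat × Nat) item =>
        let (nf, np, nw, ne, ni) := c
        if PySem.Str.isIn "FAIL" item then (nf + 1, np, nw, ne, ni)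
        else if PySem.Str.isIn "PASS" item then (nf, np + 1, nw, ne, ni)
        else if PySem.Str.isIn "WARNING" item then (nf, np, nw + 1, ne, ni)
        else (nf, np, nw, ne, ni + 1))
      (nf, np, nw, ne, ni)).2.1
      = np + l.countP (fun item => !PySem.Str.isIn "FAIL" item && PySem.Str.isIn "PASS" item) := by
  induction l generalizing nf np nw ne ni with
  | nil => simp
  | cons x xs ih =>
    simp only [List.foldl_cons, List.countP_cons]
    by_cases hf : PySem.Str.isIn "FAIL" x = true
    · rw [if_pos hf, if_pos hf,
        if_neg (fun hh => (Bool.eq_false_iff.mp (by rw [hf]; rfl : (!PySem.Str.isIn "FAIL" x && PySem.Str.isIn "PASS" x) = false)) hh)]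
      obtain ⟨i1, i2⟩ := ih (nf + 1) np nw ne ni
      exact ⟨by rw [i1]; omega, by rw [i2]; omega⟩
    · have hf' : PySem.Str.isIn "FAIL" x = false := Bool.eq_false_iff.mpr hf
      rw [if_neg hf, if_neg hf]
      by_cases hp : PySem.Str.isIn "PASS" x = true
      · rw [if_pos hp,
          if_pos (by rw [hf', hp]; rfl : (!PySem.Str.isIn "FAIL" x && PySem.Str.isIn "PASS" x) = true)]
        obtain ⟨i1, i2⟩ := ih nf (np + 1) nw ne ni
        exact ⟨by rw [i1]; omega, by rw [i2]; omega⟩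
      · have hp' : PySem.Str.isIn "PASS" x = false := Bool.eq_false_iff.mpr hp
        rw [if_neg hp,
          if_neg (Bool.eq_false_iff.mp (by rw [hf', hp']; rfl : (!PySem.Str.isIn "FAIL" x && PySem.Str.isIn "PASS" x) = false))]
        by_cases hw : PySem.Str.isIn "WARNING" x = true
        · rw [if_pos hw]
          obtain ⟨i1, i2⟩ := ih nf np (nw + 1) ne ni
          exact ⟨by rw [i1]; omega, by rw [i2]; omega⟩
        · rw [if_neg hw]
          obtain ⟨i1, i2⟩ := ih nf np nw ne (ni + 1)
          exact ⟨by rw [i1]; omega, by rw [i2]; omega⟩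

-- ===== VERDICT (by name: the statement is the Claim_ definition above) =====
theorem get_me_overall_audit_result_spec : Claim_equal_get_me_overall_audit_result := by
  intro l _
  unfold Spec_get_me_overall_audit_result get_me_overall_audit_result get_me_overall_audit_result_alt
  obtain ⟨h1, h2⟩ := pvFoldCounts l 0 0 0 0 0
  simp only [h1, h2, Nat.zero_add]
  by_cases hf : ∃ item ∈ l, PySem.Str.isIn "FAIL" item = true
  · rw [if_pos (List.countP_pos_iff.mpr hf), if_pos (List.any_eq_true.mpr hf)]
  · rw [if_neg (fun h => hf (List.countP_pos_iff.mp h)),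
      if_neg (fun h => hf (List.any_eq_true.mp h))]
    by_cases hp : ∃ item ∈ l, PySem.Str.isIn "PASS" item = true
    · have hp' : ∃ item ∈ l, (!PySem.Str.isIn "FAIL" item && PySem.Str.isIn "PASS" item) = true := by
        obtain ⟨x, hx, hpx⟩ := hp
        have hfx : PySem.Str.isIn "FAIL" x = false :=
          Bool.eq_false_iff.mpr (fun h => hf ⟨x, hx, h⟩)
        exact ⟨x, hx, by rw [hfx, hpx]; rfl⟩
      rw [if_pos (List.countP_pos_iff.mpr hp'), if_pos (List.any_eq_true.mpr hp)]
    · have hp' : ¬ ∃ item ∈ l, (!PySem.Str.isIn "FAIL" item && PySem.Str.isIn "PASS" item) = true := by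
        rintro ⟨x, hx, h⟩
        simp only [Bool.and_eq_true, Bool.not_eq_true'] at h
        exact hp ⟨x, hx, h.2⟩
      rw [if_neg (fun h => hp' (List.countP_pos_iff.mp h)),
        if_neg (fun h => hp (List.any_eq_true.mp h))]
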